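-- pv_equiv track=rewrite | github.com/benedikt-schesch/LLMerge | src/metrics_conflict_blocks.py | split_single_conflict_snippet
-- ===== SOURCE A (Python) =====
-- from typing import List, Optional, Tuple
--
-- def split_single_conflict_snippet(
--     lines: List[str],
-- ) -> Tuple[List[str], List[str], List[str]]:
--     """
--     Given a list of lines that contain exactly one conflict block
--     (which should have <<<<<<< ... >>>>>>>),
--     returns (before_context, conflict_block, after_context).
--
--     If markers are not found, raises a ValueError.
--     """
--     start_idx = -1
--     end_idx = -1
--
--     # Locate <<<<<<< marker
--     for i, line in enumerate(lines):
--         if line.startswith("<<<<<<<"):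
--             start_idx = i
--             break
--
--     if start_idx == -1:
--         raise ValueError("Could not find start marker (<<<<<<<).")
--
--     # Locate >>>>>>> marker
--     for j in range(start_idx, len(lines)):
--         if lines[j].startswith(">>>>>>>"):
--             end_idx = j
--             break
--
--     if end_idx == -1:
--         raise ValueError("Found start marker but no end marker (>>>>>>>).")
--
--     before_context = lines[:start_idx]
--     conflict_block = lines[start_idx : end_idx + 1]  # include end marker line
--     after_context = lines[end_idx + 1 :]
--
--     return before_context, conflict_block, after_context
-- ===== SOURCE B (Python) =====
-- from typing import List, Tuple
--
-- def split_single_conflict_snippet(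
--     lines: List[str],
-- ) -> Tuple[List[str], List[str], List[str]]:
--     """Single structural sweep: build the three sections directly while
--     consuming the lines, instead of locating indices and slicing."""
--     it = iter(lines)
--     before: List[str] = []
--     for line in it:
--         if line.startswith("<<<<<<<"):
--             conflict = [line]
--             for inner in it:
--                 conflict.append(inner)
--                 if inner.startswith(">>>>>>>"):
--                     return before, conflict, list(it)
--             raise ValueError("Found start marker but no end marker (>>>>>>>).")
--         before.append(line)
--     raise ValueError("Could not find start marker (<<<<<<<).")
-- ===== Notes on version B (the rewrite author's own statement) =====
-- stated objective: simpler
-- what changed: B replaces A's two index-locating scans (sentinel -1, enumerate + range(start,len)) and three slice expressions by one structural sweep over the shared iterator that builds before/conflict/after directly.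
import Mathlib
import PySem

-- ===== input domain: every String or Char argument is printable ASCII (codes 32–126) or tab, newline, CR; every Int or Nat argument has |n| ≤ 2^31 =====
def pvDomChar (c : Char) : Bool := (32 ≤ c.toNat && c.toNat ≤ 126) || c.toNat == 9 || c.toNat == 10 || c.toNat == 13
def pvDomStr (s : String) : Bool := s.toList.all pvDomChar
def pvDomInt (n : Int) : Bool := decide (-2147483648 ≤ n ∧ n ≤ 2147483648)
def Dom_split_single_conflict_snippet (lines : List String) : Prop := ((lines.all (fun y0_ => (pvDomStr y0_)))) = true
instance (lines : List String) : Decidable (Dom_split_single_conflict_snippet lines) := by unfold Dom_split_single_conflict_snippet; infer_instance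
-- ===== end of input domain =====

-- B replaces A's two index-locating scans + three slices by one structural sweep that
-- builds the three sections directly (objective: simpler; same O(n) cost).

-- ===== PORT A =====
-- first loop of A: enumerate lines, break at the first line starting with "<<<<<<<"; -1 if none
def pvFindStartAux : List String → Nat → Int
  | [], _ => -1
  | l :: rest, i =>
    if PySem.Str.startswith l "<<<<<<<" then (i : Int) else pvFindStartAux rest (i + 1)

-- second loop of A: for j in range(start_idx, len(lines)), break at the first lines[j]
-- starting with ">>>>>>>"; -1 if none.  (The .getD "" is unreachable: every j produced by
-- pyRange start_idx len lies in range, so pyGet? is always some.)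
def pvFindEndAux (lines : List String) : List Int → Int
  | [] => -1
  | j :: js =>
    if PySem.Str.startswith ((PySem.List.pyGet? lines j).getD "") ">>>>>>>" then j
    else pvFindEndAux lines js

def split_single_conflict_snippet (lines : List String) : List String × List String × List String :=
  let start_idx := pvFindStartAux lines 0
  if start_idx = -1 then ([], [], [])  -- Python raises ValueError here; excluded by Pre_
  else
    let end_idx := pvFindEndAux lines (PySem.List.pyRange start_idx (lines.length : Int) 1)
    if end_idx = -1 then ([], [], [])  -- Python raises ValueError here; excluded by Pre_
    else
      (PySem.List.slice lines none (some start_idx),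
       PySem.List.slice lines (some start_idx) (some (end_idx + 1)),
       PySem.List.slice lines (some (end_idx + 1)) none)

-- ===== PORT B =====
-- inner loop of B: consume lines into the conflict block until (and including) the end
-- marker; the leftover iterator becomes the after-context.  none = the ValueError path.
def pvGoConflict : List String → Option (List String × List String)
  | [] => none
  | l :: rest =>
    if PySem.Str.startswith l ">>>>>>>" then some ([l], rest)
    else
      match pvGoConflict rest with
      | some (c, after) => some (l :: c, after)
      | none => none

-- outer loop of B: accumulate before-context until the start marker, then hand over to
-- the inner sweep.  none = the ValueError paths.
def pvGoBefore : List String → Option (List String × List String × List String)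
  | [] => none
  | l :: rest =>
    if PySem.Str.startswith l "<<<<<<<" then
      match pvGoConflict rest with
      | some (c, after) => some ([], l :: c, after)
      | none => none
    else
      match pvGoBefore rest with
      | some (b, c, a) => some (l :: b, c, a)
      | none => none

def split_single_conflict_snippet_alt (lines : List String) : List String × List String × List String :=
  (pvGoBefore lines).getD ([], [], [])  -- Python raises ValueError on the none branch; excluded by Pre_

-- ===== PRECONDITION & SPEC =====
-- Pre_ excludes exactly the inputs on which A raises ValueError: those with no line
-- starting with "<<<<<<<", or no line starting with ">>>>>>>" at or after the first one.
def Pre_split_single_conflict_snippet (lines : List String) : Prop :=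
  ((lines.dropWhile (fun l => !PySem.Str.startswith l "<<<<<<<")).any
    (fun l => PySem.Str.startswith l ">>>>>>>")) = true

instance (lines : List String) : Decidable (Pre_split_single_conflict_snippet lines) := by
  unfold Pre_split_single_conflict_snippet; infer_instance

def pvWitness_split_single_conflict_snippet : List String :=
  ["a", "<<<<<<< ours", "x", "=======", "y", ">>>>>>> theirs", "b"]

def Spec_split_single_conflict_snippet (lines : List String) (out : List String × List String × List String) : Prop := out = split_single_conflict_snippet_alt lines
instance (lines : List String) (out : List String × List String × List String) : Decidable (Spec_split_single_conflict_snippet lines out) := by unfold Spec_split_single_conflict_snippet; infer_instance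

-- ===== CLAIM (what is proved, stated in full; the proofs are below) =====
def Claim_equal_split_single_conflict_snippet : Prop := ∀ (lines : List String), Dom_split_single_conflict_snippet lines → Pre_split_single_conflict_snippet lines → Spec_split_single_conflict_snippet lines (split_single_conflict_snippet lines)

-- ===== LEMMAS AND PROOFS =====

-- A line starting with "<<<<<<<" cannot also start with ">>>>>>>".
lemma pv_marker_disjoint (l : String)
    (h : PySem.Str.startswith l "<<<<<<<" = true) :
    PySem.Str.startswith l ">>>>>>>" = false := by
  by_contra hq
  rw [Bool.not_eq_false] at hq
  rw [PySem.Str.startswith_eq, PySem.Chars.startswith_iff] at h hq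
  have hlen : ("<<<<<<<".toList).length ≤ (">>>>>>>".toList).length := by decide
  have := List.prefix_of_prefix_length_le h hq hlen
  revert this; decide

-- A's first loop finds the first index satisfying the start predicate, offset by i.
lemma pvFindStartAux_eq (lines : List String) (i : Nat) :
    pvFindStartAux lines i =
      match lines.findIdx? (fun l => PySem.Str.startswith l "<<<<<<<") with
      | some k => ((i + k : Nat) : Int)
      | none => -1 := by
  induction lines generalizing i with
  | nil => simp [pvFindStartAux]
  | cons l rest ih =>
    rw [pvFindStartAux, List.findIdx?_cons]
    by_cases h : PySem.Str.startswith l "<<<<<<<" = true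
    · rw [if_pos h, if_pos h]
      norm_num
    · rw [if_neg h, if_neg h, ih (i + 1)]
      cases rest.findIdx? (fun l => PySem.Str.startswith l "<<<<<<<") with
      | none => rfl
      | some k =>
        show ((i + 1 + k : Nat) : Int) = ((i + (k + 1) : Nat) : Int)
        congr 1; omega

-- A's second loop, run on range(a, len(lines)), finds the first index ≥ a whose line
-- satisfies the end predicate.
lemma pvFindEndAux_eq (lines : List String) (a : Nat) (d : List String)
    (hd : lines.drop a = d) :
    pvFindEndAux lines (PySem.List.pyRange (a : Int) (lines.length : Int) 1) =
      match d.findIdx? (fun l => PySem.Str.startswith l ">>>>>>>") with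
      | some m => ((a + m : Nat) : Int)
      | none => -1 := by
  induction d generalizing a with
  | nil =>
    have hle : lines.length ≤ a := by
      have := List.drop_eq_nil_iff.mp hd; omega
    rw [PySem.List.pyRange_one_eq_nil (by exact_mod_cast hle)]
    simp [pvFindEndAux]
  | cons x ds ih =>
    have hlt : a < lines.length := by
      by_contra h
      rw [List.drop_eq_nil_of_le (by omega)] at hd
      simp at hd
    have hx : lines[a]? = some x := by
      have h0 : (lines.drop a)[0]? = some x := by rw [hd]; rfl
      rw [List.getElem?_drop] at h0; simpa using h0
    rw [PySem.List.pyRange_one_cons (by exact_mod_cast hlt)]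
    rw [pvFindEndAux, PySem.List.pyGet?_natCast, hx, Option.getD_some, List.findIdx?_cons]
    by_cases hq : PySem.Str.startswith x ">>>>>>>" = true
    · rw [if_pos hq, if_pos hq]
      norm_num
    · have hd' : lines.drop (a + 1) = ds := by
        have h2 : (lines.drop a).drop 1 = ds := by rw [hd]; rfl
        rwa [List.drop_drop] at h2
      have hcast : ((a : Nat) : Int) + 1 = ((a + 1 : Nat) : Int) := by push_cast; ring
      rw [if_neg hq, if_neg hq, hcast, ih (a + 1) hd']
      cases ds.findIdx? (fun l => PySem.Str.startswith l ">>>>>>>") with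
      | none => rfl
      | some m =>
        show ((a + 1 + m : Nat) : Int) = ((a + (m + 1) : Nat) : Int)
        congr 1; omega

-- B's inner sweep splits at the first end marker, keeping it in the conflict block.
lemma pvGoConflict_eq (rest : List String) :
    pvGoConflict rest =
      match rest.findIdx? (fun l => PySem.Str.startswith l ">>>>>>>") with
      | some m => some (rest.take (m + 1), rest.drop (m + 1))
      | none => none := by
  induction rest with
  | nil => simp [pvGoConflict]
  | cons l rs ih =>
    rw [pvGoConflict, List.findIdx?_cons]
    by_cases hq : PySem.Str.startswith l ">>>>>>>" = true
    · rw [if_pos hq, if_pos hq]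
      rfl
    · rw [if_neg hq, if_neg hq, ih]
      cases rs.findIdx? (fun l => PySem.Str.startswith l ">>>>>>>") with
      | none => rfl
      | some m => rfl

-- B's outer sweep, characterised by the two first-match indices.
lemma pvGoBefore_eq (lines : List String) :
    pvGoBefore lines =
      match lines.findIdx? (fun l => PySem.Str.startswith l "<<<<<<<") with
      | none => none
      | some k =>
        match (lines.drop (k + 1)).findIdx? (fun l => PySem.Str.startswith l ">>>>>>>") with
        | none => none
        | some m => some (lines.take k, (lines.drop k).take (m + 2), lines.drop (k + m + 2)) := by
  induction lines with
  | nil => simp [pvGoBefore]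
  | cons l rest ih =>
    rw [pvGoBefore, List.findIdx?_cons]
    by_cases hp : PySem.Str.startswith l "<<<<<<<" = true
    · rw [if_pos hp, if_pos hp, pvGoConflict_eq]
      cases hq : rest.findIdx? (fun l => PySem.Str.startswith l ">>>>>>>") with
      | none =>
        simp at hq
        simp [List.findIdx?_eq_none_iff.mpr hq]
      | some m =>
        simp at hq
        simp [hq, List.take_succ_cons, List.drop_succ_cons]
    · rw [if_neg hp, if_neg hp, ih]
      cases hk : rest.findIdx? (fun l => PySem.Str.startswith l "<<<<<<<") with
      | none => simp
      | some k =>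
        simp only [Option.map_some, List.drop_succ_cons]
        cases hm : (rest.drop (k + 1)).findIdx? (fun l => PySem.Str.startswith l ">>>>>>>") with
        | none => rfl
        | some m =>
          simp only [List.take_succ_cons]
          have h2 : k + 1 + m + 1 = k + m + 2 := by omega
          rw [h2]

-- The two ports agree on every input (both take the junk value exactly on the
-- inputs their Pythons raise on).
lemma pv_ports_agree (lines : List String) :
    split_single_conflict_snippet lines = split_single_conflict_snippet_alt lines := by
  unfold split_single_conflict_snippet split_single_conflict_snippet_alt
  rw [pvFindStartAux_eq, pvGoBefore_eq]
  cases hk : lines.findIdx? (fun l => PySem.Str.startswith l "<<<<<<<") with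
  | none => simp
  | some k =>
    obtain ⟨hklt, hpk, -⟩ := List.findIdx?_eq_some_iff_getElem.mp hk
    simp only [Nat.zero_add]
    have hdk : lines.drop k = lines[k] :: lines.drop (k + 1) := by
      exact (List.drop_eq_getElem_cons hklt)
    rw [pvFindEndAux_eq lines k _ hdk]
    rw [List.findIdx?_cons, pv_marker_disjoint _ hpk]
    simp only [Bool.false_eq_true, if_false]
    cases hm : (lines.drop (k + 1)).findIdx? (fun l => PySem.Str.startswith l ">>>>>>>") with
    | none => simp
    | some m =>
      have hne : ¬ (((k + (m + 1) : Nat) : Int) = -1) := by push_cast; omega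
      simp only [Option.map_some, hne, if_false, Option.getD_some]
      have h1 : ((k + (m + 1) : Nat) : Int) + 1 = ((k + m + 2 : Nat) : Int) := by
        push_cast; ring
      refine congrArg₂ Prod.mk ?_ (congrArg₂ Prod.mk ?_ ?_)
      · exact PySem.List.slice_to_natCast lines k
      · rw [h1, PySem.List.slice_natCast]
        congr 1; omega
      · rw [h1, PySem.List.slice_from_natCast]

-- ===== VERDICT (by name: the statement is the Claim_ definition above) =====
theorem split_single_conflict_snippet_spec : Claim_equal_split_single_conflict_snippet := by
  intro lines _ _
  exact pv_ports_agree lines
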